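-- pv_equiv track=rewrite | github.com/JackAvis/LeetCode | Solutions/Solved/Python/FindAndReplacePattern.py | findDict
-- ===== SOURCE A (Python) =====
-- def findDict(word):
--     d =  {}
--     l = 0
--     l_dict = {}
--     for letter in range(len(word)):
--         if word[letter] not in l_dict:
--             d[letter] = l
--             l_dict[word[letter]] = l
--             l += 1
--         else:
--             d[letter] = l_dict[word[letter]]
--     return d
-- ===== SOURCE B (Python) =====
-- def findDict(word):
--     # label of a letter = number of distinct letters strictly before its first occurrence
--     return {i: len(set(word[:word.index(word[i])])) for i in range(len(word))}
-- ===== Notes on version B (the rewrite author's own statement) =====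
-- stated objective: simpler
-- what changed: Replaces A's stateful single pass (running counter, char->label dict, index->label dict, if/else) by a direct one-line per-index formula: the label of word[i] is the number of distinct letters strictly before the first occurrence of word[i], computed with str.index and set cardinality; no tables or counters are maintained.
import Mathlib
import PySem

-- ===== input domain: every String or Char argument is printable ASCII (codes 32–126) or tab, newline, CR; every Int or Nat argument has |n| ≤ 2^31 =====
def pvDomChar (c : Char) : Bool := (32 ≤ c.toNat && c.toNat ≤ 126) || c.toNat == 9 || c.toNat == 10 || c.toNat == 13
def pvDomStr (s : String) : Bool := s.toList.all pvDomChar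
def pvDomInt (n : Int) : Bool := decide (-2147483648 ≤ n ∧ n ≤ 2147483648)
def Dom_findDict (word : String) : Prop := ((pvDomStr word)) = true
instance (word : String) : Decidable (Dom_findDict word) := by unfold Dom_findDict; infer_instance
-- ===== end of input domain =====

-- B replaces A's stateful pass (counter + two dicts + if/else) by a direct per-index
-- formula: label = number of distinct letters before the first occurrence; objective: simpler.

-- ===== PORT A =====
-- A's loop body: state (d, l, l_dict); 'for letter in range(len(word))' with 'word[letter]'
-- is ported as a fold over the index/char pairs (the index is always in range, so this is exact).
def findDictStep (st : PySem.Dict Int Int × Int × PySem.Dict Char Int) (p : Int × Char) :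
    PySem.Dict Int Int × Int × PySem.Dict Char Int :=
  if st.2.2.contains p.2 = false then
    (st.1.insert p.1 st.2.1, st.2.1 + 1, st.2.2.insert p.2 st.2.1)
  else
    (st.1.insert p.1 ((st.2.2.get? p.2).getD 0), st.2.1, st.2.2)

def findDict (word : String) : List (Int × Int) :=
  ((PySem.List.enumerate word.toList 0).foldl findDictStep
    (PySem.Dict.empty, 0, PySem.Dict.empty)).1.items

-- ===== PORT B =====
-- {i: len(set(word[:word.index(word[i])])) for i in range(len(word))}.
-- word.index(word[i]) always succeeds (the char occurs at i), so index?.getD 0 is exact;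
-- word[:j] with 0 ≤ j is PySem.List.slice … none (some j); len(set(…)) is PySem.Set.len ∘ ofList.
def findDict_alt (word : String) : List (Int × Int) :=
  (PySem.List.enumerate word.toList 0).map (fun p =>
    (p.1, PySem.Set.len (PySem.Set.ofList
      (PySem.List.slice word.toList none
        (some (((PySem.List.index? word.toList p.2).getD 0 : Nat) : Int))))))

-- ===== PRECONDITION & SPEC =====
def Spec_findDict (word : String) (out : List (Int × Int)) : Prop := out = findDict_alt word
instance (word : String) (out : List (Int × Int)) : Decidable (Spec_findDict word out) := by unfold Spec_findDict; infer_instance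

-- ===== CLAIM (what is proved, stated in full; the proofs are below) =====
def Claim_equal_findDict : Prop := ∀ (word : String), Dom_findDict word → Spec_findDict word (findDict word)

-- ===== LEMMAS AND PROOFS =====

-- first-appearance dedup (a local name, shielded from simp normalisation)
def ded (cs : List Char) : List Char := PySem.Set.ofList cs

theorem mem_ded {cs : List Char} {c : Char} : c ∈ ded cs ↔ c ∈ cs :=
  PySem.Set.mem_ofList cs c

theorem nodup_ded (cs : List Char) : (ded cs).Nodup := PySem.Set.nodup_ofList cs

theorem ded_append_of_mem {cs : List Char} {c : Char} (h : c ∈ cs) :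
    ded (cs ++ [c]) = ded cs := by
  unfold ded
  rw [PySem.Set.ofList_append_singleton]
  exact PySem.Set.add_of_mem ((PySem.Set.mem_ofList cs c).mpr h)

theorem ded_append_of_not_mem {cs : List Char} {c : Char} (h : c ∉ cs) :
    ded (cs ++ [c]) = ded cs ++ [c] := by
  unfold ded
  rw [PySem.Set.ofList_append_singleton]
  exact PySem.Set.add_of_not_mem (fun hm => h ((PySem.Set.mem_ofList cs c).mp hm))

-- canonical label of a char: its position in the first-appearance dedup of cs
def lbl (cs : List Char) (c : Char) : Int :=
  (((PySem.List.index? (ded cs) c).getD 0 : Nat) : Int)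

-- the l_dict built from cs, as a literal dict
def ldictOf (cs : List Char) : PySem.Dict Char Int :=
  ⟨(PySem.List.enumerate (ded cs) 0).map (fun p => (p.2, p.1))⟩

theorem ldictOf_keys (cs : List Char) : (ldictOf cs).keys = ded cs := by
  simp only [ldictOf, PySem.Dict.keys_mk, List.map_map, Function.comp_def]
  exact PySem.List.map_snd_enumerate _ _

theorem ldictOf_get (cs : List Char) (c : Char) (h : c ∈ cs) :
    (ldictOf cs).get? c = some (lbl cs c) := by
  have hmem : c ∈ ded cs := mem_ded.mpr h
  have hsome : (PySem.List.index? (ded cs) c).isSome :=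
    (PySem.List.index?_isSome_iff _ _).mpr hmem
  obtain ⟨k, hk⟩ := Option.isSome_iff_exists.mp hsome
  obtain ⟨hlt, hget, -⟩ := PySem.List.getElem_of_index?_eq_some hk
  have hitem : (c, (k : Int)) ∈ (ldictOf cs).items := by
    have h1 : ((0 : Int) + (k : Int), (ded cs)[k]) ∈ PySem.List.enumerate (ded cs) 0 :=
      (PySem.List.mem_enumerate_iff _ _ _).mpr ⟨k, hlt, rfl⟩
    have h2 := List.mem_map_of_mem (f := fun p => (p.2, p.1)) h1
    rw [hget] at h2
    simpa [ldictOf] using h2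
  have hnd : (ldictOf cs).keys.Nodup := by rw [ldictOf_keys]; exact nodup_ded cs
  rw [PySem.Dict.get?_of_mem_items _ hitem hnd]
  simp only [lbl, hk, Option.getD_some]

theorem ldictOf_contains (cs : List Char) (c : Char) :
    (ldictOf cs).contains c = true ↔ c ∈ cs := by
  rw [PySem.Dict.contains_iff_mem_keys, ldictOf_keys]
  exact mem_ded

-- the d built from cs, as a literal dict
def dOf (cs : List Char) : PySem.Dict Int Int :=
  ⟨(PySem.List.enumerate cs 0).map (fun p => (p.1, lbl cs p.2))⟩

theorem dOf_fresh (cs : List Char) : (dOf cs).contains (cs.length : Int) = false := by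
  by_contra hcon
  have hmem : ((cs.length : Int)) ∈ (dOf cs).keys :=
    (PySem.Dict.contains_iff_mem_keys _ _).mp (by simpa using hcon)
  simp only [dOf, PySem.Dict.keys_mk, List.map_map, Function.comp_def, List.mem_map] at hmem
  obtain ⟨p, hp, hfst⟩ := hmem
  obtain ⟨k, hk, rfl⟩ := (PySem.List.mem_enumerate_iff _ _ _).mp hp
  simp at hfst
  omega

theorem snd_mem_of_mem_enumerate {cs : List Char} {p : Int × Char}
    (hp : p ∈ PySem.List.enumerate cs 0) : p.2 ∈ cs := by
  obtain ⟨k, hk, rfl⟩ := (PySem.List.mem_enumerate_iff _ _ _).mp hp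
  exact List.getElem_mem hk

theorem fold_inv (cs : List Char) :
    (PySem.List.enumerate cs 0).foldl findDictStep (PySem.Dict.empty, 0, PySem.Dict.empty)
    = (dOf cs, (((ded cs).length : Int)), ldictOf cs) := by
  induction cs using List.reverseRecOn with
  | nil => rfl
  | append_singleton cs c ih =>
    rw [PySem.List.enumerate_append, List.foldl_append, ih]
    rw [show PySem.List.enumerate [c] ((0 : Int) + (cs.length : Int))
          = [((cs.length : Int), c)] by
        simp [PySem.List.enumerate_cons, PySem.List.enumerate_nil]]
    simp only [List.foldl_cons, List.foldl_nil]
    by_cases hc : c ∈ cs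
    · have hcont : (ldictOf cs).contains c = true := (ldictOf_contains cs c).mpr hc
      have hded := ded_append_of_mem hc
      have hlbl : lbl (cs ++ [c]) = lbl cs := by
        funext c'; unfold lbl; rw [hded]
      have hstep : findDictStep (dOf cs, (((ded cs).length : Int)), ldictOf cs)
            (((cs.length : Nat) : Int), c)
          = ((dOf cs).insert ((cs.length : Nat) : Int) (lbl cs c),
             (((ded cs).length : Int)), ldictOf cs) := by
        simp [findDictStep, hcont, ldictOf_get cs c hc]
      rw [hstep]
      refine Prod.ext ?_ (Prod.ext ?_ ?_)
      · apply PySem.Dict.ext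
        rw [PySem.Dict.items_insert_of_not_contains _ _ (dOf_fresh cs)]
        simp only [dOf, hlbl, PySem.List.enumerate_append, PySem.List.enumerate_cons,
          PySem.List.enumerate_nil, List.map_append, List.map_cons, List.map_nil, zero_add]
      · simp [hded]
      · simp only [ldictOf, hded]
    · have hcont : (ldictOf cs).contains c = false := by
        rcases Bool.eq_false_or_eq_true ((ldictOf cs).contains c) with h | h
        · exact absurd ((ldictOf_contains cs c).mp h) hc
        · exact h
      have hded := ded_append_of_not_mem hc
      have hcmem : c ∉ ded cs := fun h => hc (mem_ded.mp h)
      have hstep : findDictStep (dOf cs, (((ded cs).length : Int)), ldictOf cs)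
            (((cs.length : Nat) : Int), c)
          = ((dOf cs).insert ((cs.length : Nat) : Int) (((ded cs).length : Int)),
             (((ded cs).length : Int)) + 1,
             (ldictOf cs).insert c (((ded cs).length : Int))) := by
        simp [findDictStep, hcont]
      rw [hstep]
      refine Prod.ext ?_ (Prod.ext ?_ ?_)
      · apply PySem.Dict.ext
        rw [PySem.Dict.items_insert_of_not_contains _ _ (dOf_fresh cs)]
        simp only [dOf, PySem.List.enumerate_append, PySem.List.enumerate_cons,
          PySem.List.enumerate_nil, List.map_append, List.map_cons, List.map_nil, zero_add]
        congr 1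
        · apply List.map_congr_left
          intro p hp
          have hmem : p.2 ∈ ded cs := mem_ded.mpr (snd_mem_of_mem_enumerate hp)
          simp only [lbl, hded, PySem.List.index?_append_of_mem _ hmem]
        · simp only [lbl, hded, PySem.List.index?_append_singleton_self _ c hcmem,
            Option.getD_some]
      · simp only [hded, List.length_append, List.length_cons, List.length_nil]
        push_cast; ring
      · have hfresh : (ldictOf cs).contains c = false := hcont
        apply PySem.Dict.ext
        rw [PySem.Dict.items_insert_of_not_contains _ _ hfresh]
        simp only [ldictOf, hded, PySem.List.enumerate_append, PySem.List.enumerate_cons,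
          PySem.List.enumerate_nil, List.map_append, List.map_cons, List.map_nil, zero_add]

-- folding Set.add only appends elements to the accumulator
theorem foldl_add_prefix (l : List Char) :
    ∀ s : PySem.Set Char, ∃ ext, l.foldl PySem.Set.add s = s ++ ext := by
  induction l with
  | nil => intro s; exact ⟨[], by simp⟩
  | cons x t ih =>
    intro s
    obtain ⟨e, he⟩ := ih (PySem.Set.add s x)
    by_cases hx : x ∈ s
    · exact ⟨e, by simpa [PySem.Set.add, hx] using he⟩
    · refine ⟨x :: e, ?_⟩
      simp only [List.foldl_cons, he]
      simp [PySem.Set.add, hx]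

-- B's per-index formula equals A's canonical label
theorem lbl_eq_card_before (cs : List Char) (c : Char) (h : c ∈ cs) :
    lbl cs c
      = PySem.Set.len (PySem.Set.ofList
          (cs.take ((PySem.List.index? cs c).getD 0))) := by
  have hsome : (PySem.List.index? cs c).isSome :=
    (PySem.List.index?_isSome_iff _ _).mpr h
  obtain ⟨k, hk⟩ := Option.isSome_iff_exists.mp hsome
  obtain ⟨pre, suf, hcs, hlen, hpre⟩ := (PySem.List.index?_eq_some_iff _ _ _).mp hk
  have htake : cs.take k = pre := by
    rw [hcs, ← hlen, List.take_left]
  have hnp : c ∉ PySem.Set.ofList pre := fun hm => hpre ((PySem.Set.mem_ofList pre c).mp hm)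
  obtain ⟨ext, hext⟩ := foldl_add_prefix suf (PySem.Set.ofList pre ++ [c])
  have hof : PySem.Set.ofList cs = (PySem.Set.ofList pre ++ [c]) ++ ext := by
    have h1 : PySem.Set.ofList cs
        = suf.foldl PySem.Set.add (PySem.Set.ofList (pre ++ [c])) := by
      rw [hcs, PySem.Set.ofList_eq_foldl, show pre ++ c :: suf = (pre ++ [c]) ++ suf by simp,
        List.foldl_append, ← PySem.Set.ofList_eq_foldl]
    have h2 : PySem.Set.ofList (pre ++ [c]) = PySem.Set.ofList pre ++ [c] := by
      rw [PySem.Set.ofList_append_singleton]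
      exact PySem.Set.add_of_not_mem hnp
    rw [h1, h2, hext]
  have hidx : PySem.List.index? (ded cs) c = some (PySem.Set.ofList pre).length := by
    unfold ded
    rw [hof,
      PySem.List.index?_append_of_mem _ (by simp : c ∈ PySem.Set.ofList pre ++ [c])]
    exact PySem.List.index?_append_singleton_self _ c hnp
  simp only [lbl, hidx, Option.getD_some, hk, htake, PySem.Set.len]

-- ===== VERDICT (by name: the statement is the Claim_ definition above) =====
theorem findDict_spec : Claim_equal_findDict := by
  intro word _
  unfold Spec_findDict findDict findDict_alt
  rw [fold_inv]
  show (dOf word.toList).items = _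
  simp only [dOf]
  apply List.map_congr_left
  intro p hp
  rw [PySem.List.slice_to_natCast,
    ← lbl_eq_card_before _ _ (snd_mem_of_mem_enumerate hp)]
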